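-- pv_equiv track=rewrite | github.com/Zerf8/zerf_transcriptor | script_colab_7_marzo_whisper_v3.py | get_prompt_for_year
-- ===== SOURCE A (Python) =====
-- PROMPT_BASE = (
--     "Transcripción en español y català. Hola Culerada y Hola Zerfistas. "
--     "Análisis del FC Barcelona. Canal: Zerf. Comunidad: Zerfistas. Culerada. "
--     "Evitar repeticiones y alucinaciones. Si hay silencio, no inventar palabras. "
-- )
--
-- PLANTILLAS_POR_ANO = {
--     2016: "Ter Stegen, Bravo, Piqué, Mascherano, Mathieu, Digne, Jordi Alba, Aleix Vidal, Busquets, Iniesta, Rakitić, Rafinha Alcântara, Arda Turan, Denis Suárez, Messi, Suárez, Neymar, Munir",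
--     2017: "Ter Stegen, Piqué, Umtiti, Mascherano, Jordi Alba, Semedo, Busquets, Iniesta, Rakitić, André Gomes, Denis Suárez, Paulinho, Messi, Suárez, Dembélé, Deulofeu",
--     2018: "Ter Stegen, Piqué, Lenglet, Umtiti, Jordi Alba, Semedo, Busquets, Iniesta, Rakitić, Arthur, Coutinho, Messi, Suárez, Dembélé, Malcom, Munir",
--     2019: "Ter Stegen, Piqué, Lenglet, Umtiti, Jordi Alba, Semedo, Busquets, de Jong, Rakitić, Vidal, Arthur, Griezmann, Suárez, Messi, Dembélé, Coutinho, Junior Firpo",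
--     2020: "Ter Stegen, Piqué, Lenglet, Araujo, Jordi Alba, Dest, Busquets, de Jong, Pedri, Trincão, Mingueza, Griezmann, Messi, Dembélé, Coutinho, Braithwaite",
--     2021: "Ter Stegen, Piqué, Araujo, Mingueza, Eric García, Dest, Jordi Alba, Busquets, de Jong, Pedri, Gavi, Luuk de Jong, Kun Agüero, Depay, Ansu Fati, Dembélé, Braithwaite, Coutinho",
--     2022: "Ter Stegen, Piqué, Araujo, Koundé, Christensen, Balde, Jordi Alba, Azpilicueta, Marcos Alonso, Busquets, de Jong, Pedri, Gavi, Lewandowski, Raphinha, Ansu Fati, Ferran Torres, Depay, Aubameyang, Dembélé",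
--     2023: "Ter Stegen, Araujo, Koundé, Christensen, Eric García, Balde, Cancelo, Busquets, de Jong, Pedri, Gavi, Gündoğan, Fermín, Lewandowski, Raphinha, Ansu Fati, Ferran Torres, Dembélé, João Félix, Vitor Roque, Oriol Romeu",
--     2024: "Ter Stegen, Iñaki Peña, Araujo, Koundé, Cubarsí, Eric García, Balde, Héctor Fort, Casadó, de Jong, Pedri, Gavi, Fermín, Dani Olmo, Lamine Yamal, Raphinha, Lewandowski, Pau Víctor, Ansu Fati, Flick, Hansi Flick, Laporta, Deco",
--     2025: "Ter Stegen, Iñaki Peña, Araujo, Koundé, Cubarsí, Christensen, Balde, Héctor Fort, Álvaro Carreras, Casadó, de Jong, Pedri, Gavi, Fermín, Dani Olmo, Lamine Yamal, Marc Bernal, Raphinha, Lewandowski, Pau Víctor, Ansu Fati, Flick, Hansi Flick, Laporta, Deco"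
-- }
--
-- def get_prompt_for_year(date_str: str) -> str:
--     try:
--         year = int(date_str[:4]) if date_str else 2024
--     except:
--         year = 2024
--     available = sorted(PLANTILLAS_POR_ANO.keys())
--     best = available[0]
--     for y in available:
--         if y <= year: best = y
--     return PROMPT_BASE + f"Jugadores de la temporada {best}: {PLANTILLAS_POR_ANO[best]}."
-- ===== SOURCE B (Python) =====
-- PROMPT_BASE = (
--     "Transcripción en español y català. Hola Culerada y Hola Zerfistas. "
--     "Análisis del FC Barcelona. Canal: Zerf. Comunidad: Zerfistas. Culerada. "
--     "Evitar repeticiones y alucinaciones. Si hay silencio, no inventar palabras. "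
-- )
--
-- PLANTILLAS_POR_ANO = {
--     2016: "Ter Stegen, Bravo, Piqué, Mascherano, Mathieu, Digne, Jordi Alba, Aleix Vidal, Busquets, Iniesta, Rakitić, Rafinha Alcântara, Arda Turan, Denis Suárez, Messi, Suárez, Neymar, Munir",
--     2017: "Ter Stegen, Piqué, Umtiti, Mascherano, Jordi Alba, Semedo, Busquets, Iniesta, Rakitić, André Gomes, Denis Suárez, Paulinho, Messi, Suárez, Dembélé, Deulofeu",
--     2018: "Ter Stegen, Piqué, Lenglet, Umtiti, Jordi Alba, Semedo, Busquets, Iniesta, Rakitić, Arthur, Coutinho, Messi, Suárez, Dembélé, Malcom, Munir",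
--     2019: "Ter Stegen, Piqué, Lenglet, Umtiti, Jordi Alba, Semedo, Busquets, de Jong, Rakitić, Vidal, Arthur, Griezmann, Suárez, Messi, Dembélé, Coutinho, Junior Firpo",
--     2020: "Ter Stegen, Piqué, Lenglet, Araujo, Jordi Alba, Dest, Busquets, de Jong, Pedri, Trincão, Mingueza, Griezmann, Messi, Dembélé, Coutinho, Braithwaite",
--     2021: "Ter Stegen, Piqué, Araujo, Mingueza, Eric García, Dest, Jordi Alba, Busquets, de Jong, Pedri, Gavi, Luuk de Jong, Kun Agüero, Depay, Ansu Fati, Dembélé, Braithwaite, Coutinho",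
--     2022: "Ter Stegen, Piqué, Araujo, Koundé, Christensen, Balde, Jordi Alba, Azpilicueta, Marcos Alonso, Busquets, de Jong, Pedri, Gavi, Lewandowski, Raphinha, Ansu Fati, Ferran Torres, Depay, Aubameyang, Dembélé",
--     2023: "Ter Stegen, Araujo, Koundé, Christensen, Eric García, Balde, Cancelo, Busquets, de Jong, Pedri, Gavi, Gündoğan, Fermín, Lewandowski, Raphinha, Ansu Fati, Ferran Torres, Dembélé, João Félix, Vitor Roque, Oriol Romeu",
--     2024: "Ter Stegen, Iñaki Peña, Araujo, Koundé, Cubarsí, Eric García, Balde, Héctor Fort, Casadó, de Jong, Pedri, Gavi, Fermín, Dani Olmo, Lamine Yamal, Raphinha, Lewandowski, Pau Víctor, Ansu Fati, Flick, Hansi Flick, Laporta, Deco",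
--     2025: "Ter Stegen, Iñaki Peña, Araujo, Koundé, Cubarsí, Christensen, Balde, Héctor Fort, Álvaro Carreras, Casadó, de Jong, Pedri, Gavi, Fermín, Dani Olmo, Lamine Yamal, Marc Bernal, Raphinha, Lewandowski, Pau Víctor, Ansu Fati, Flick, Hansi Flick, Laporta, Deco"
-- }
--
-- def get_prompt_for_year(date_str: str) -> str:
--     try:
--         year = int(date_str[:4]) if date_str else 2024
--     except:
--         year = 2024
--     keys = sorted(PLANTILLAS_POR_ANO.keys())
--     # binary search (bisect_right) for the largest key <= year, clamped to the smallest key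
--     lo, hi = 0, len(keys)
--     while lo < hi:
--         mid = (lo + hi) // 2
--         if keys[mid] <= year:
--             lo = mid + 1
--         else:
--             hi = mid
--     best = keys[max(lo - 1, 0)]
--     return PROMPT_BASE + f"Jugadores de la temporada {best}: {PLANTILLAS_POR_ANO[best]}."
-- ===== Notes on version B (the rewrite author's own statement) =====
-- stated objective: alternative
-- what changed: The linear overwrite-scan over the sorted keys is replaced by a hand-written bisect_right binary search with the index clamped to 0, selecting the same largest key <= year.
import Mathlib
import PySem

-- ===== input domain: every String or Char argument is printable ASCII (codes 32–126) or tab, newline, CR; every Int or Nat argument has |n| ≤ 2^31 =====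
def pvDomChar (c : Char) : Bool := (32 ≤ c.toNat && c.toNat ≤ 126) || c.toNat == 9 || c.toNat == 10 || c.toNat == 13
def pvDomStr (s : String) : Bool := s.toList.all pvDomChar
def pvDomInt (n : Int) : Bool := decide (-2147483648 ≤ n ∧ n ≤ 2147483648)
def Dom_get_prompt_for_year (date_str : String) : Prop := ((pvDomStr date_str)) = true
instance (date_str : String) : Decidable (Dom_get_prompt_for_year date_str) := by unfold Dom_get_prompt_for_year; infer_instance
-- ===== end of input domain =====

-- B replaces A's linear overwrite-scan for the largest key ≤ year by a clamped bisect_right binary search (alternative, not claimed faster).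

def PROMPT_BASE : String :=
  "Transcripción en español y català. Hola Culerada y Hola Zerfistas. " ++
  "Análisis del FC Barcelona. Canal: Zerf. Comunidad: Zerfistas. Culerada. " ++
  "Evitar repeticiones y alucinaciones. Si hay silencio, no inventar palabras. "

def PLANTILLAS_POR_ANO : PySem.Dict Int String := PySem.Dict.ofList [
  (2016, "Ter Stegen, Bravo, Piqué, Mascherano, Mathieu, Digne, Jordi Alba, Aleix Vidal, Busquets, Iniesta, Rakitić, Rafinha Alcântara, Arda Turan, Denis Suárez, Messi, Suárez, Neymar, Munir"),
  (2017, "Ter Stegen, Piqué, Umtiti, Mascherano, Jordi Alba, Semedo, Busquets, Iniesta, Rakitić, André Gomes, Denis Suárez, Paulinho, Messi, Suárez, Dembélé, Deulofeu"),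
  (2018, "Ter Stegen, Piqué, Lenglet, Umtiti, Jordi Alba, Semedo, Busquets, Iniesta, Rakitić, Arthur, Coutinho, Messi, Suárez, Dembélé, Malcom, Munir"),
  (2019, "Ter Stegen, Piqué, Lenglet, Umtiti, Jordi Alba, Semedo, Busquets, de Jong, Rakitić, Vidal, Arthur, Griezmann, Suárez, Messi, Dembélé, Coutinho, Junior Firpo"),
  (2020, "Ter Stegen, Piqué, Lenglet, Araujo, Jordi Alba, Dest, Busquets, de Jong, Pedri, Trincão, Mingueza, Griezmann, Messi, Dembélé, Coutinho, Braithwaite"),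
  (2021, "Ter Stegen, Piqué, Araujo, Mingueza, Eric García, Dest, Jordi Alba, Busquets, de Jong, Pedri, Gavi, Luuk de Jong, Kun Agüero, Depay, Ansu Fati, Dembélé, Braithwaite, Coutinho"),
  (2022, "Ter Stegen, Piqué, Araujo, Koundé, Christensen, Balde, Jordi Alba, Azpilicueta, Marcos Alonso, Busquets, de Jong, Pedri, Gavi, Lewandowski, Raphinha, Ansu Fati, Ferran Torres, Depay, Aubameyang, Dembélé"),
  (2023, "Ter Stegen, Araujo, Koundé, Christensen, Eric García, Balde, Cancelo, Busquets, de Jong, Pedri, Gavi, Gündoğan, Fermín, Lewandowski, Raphinha, Ansu Fati, Ferran Torres, Dembélé, João Félix, Vitor Roque, Oriol Romeu"),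
  (2024, "Ter Stegen, Iñaki Peña, Araujo, Koundé, Cubarsí, Eric García, Balde, Héctor Fort, Casadó, de Jong, Pedri, Gavi, Fermín, Dani Olmo, Lamine Yamal, Raphinha, Lewandowski, Pau Víctor, Ansu Fati, Flick, Hansi Flick, Laporta, Deco"),
  (2025, "Ter Stegen, Iñaki Peña, Araujo, Koundé, Cubarsí, Christensen, Balde, Héctor Fort, Álvaro Carreras, Casadó, de Jong, Pedri, Gavi, Fermín, Dani Olmo, Lamine Yamal, Marc Bernal, Raphinha, Lewandowski, Pau Víctor, Ansu Fati, Flick, Hansi Flick, Laporta, Deco")]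

-- shared parsing, line for line the same in both Pythons:
-- year = int(date_str[:4]) if date_str else 2024, any exception -> 2024
def pvParseYear (date_str : String) : Int :=
  if date_str = "" then 2024
  else match PySem.Int.ofStr? (PySem.Str.slice date_str none (some 4)) with
    | some n => n
    | none => 2024

-- ===== PORT A =====
def get_prompt_for_year (date_str : String) : String :=
  let year := pvParseYear date_str
  let available := PySem.List.sorted PLANTILLAS_POR_ANO.keys (fun k => k) false
  -- best = available[0] (the literal table is nonempty, so the IndexError branch is unreachable)
  let best := available.foldl (fun best y => if y ≤ year then y else best)
                ((PySem.List.pyGet? available 0).getD 0)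
  PROMPT_BASE ++ "Jugadores de la temporada " ++ PySem.Int.toStr best ++ ": " ++
    (PLANTILLAS_POR_ANO.getD best "") ++ "."

-- ===== PORT B =====
-- while lo < hi: mid = (lo+hi)//2; if keys[mid] <= year: lo = mid+1 else hi = mid
def pvBisectRight (keys : List Int) (year : Int) (lo hi : Nat) : Nat :=
  if lo < hi then
    let mid := (lo + hi) / 2
    if PySem.List.pyGetD keys (mid : Int) 0 ≤ year then pvBisectRight keys year (mid + 1) hi
    else pvBisectRight keys year lo mid
  else lo
termination_by hi - lo
decreasing_by all_goals omega

def get_prompt_for_year_alt (date_str : String) : String :=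
  let year := pvParseYear date_str
  let keys := PySem.List.sorted PLANTILLAS_POR_ANO.keys (fun k => k) false
  let lo := pvBisectRight keys year 0 keys.length
  -- keys[max(lo - 1, 0)]: Nat subtraction is exactly the clamp to 0
  let best := PySem.List.pyGetD keys ((lo - 1 : Nat) : Int) 0
  PROMPT_BASE ++ "Jugadores de la temporada " ++ PySem.Int.toStr best ++ ": " ++
    (PLANTILLAS_POR_ANO.getD best "") ++ "."

-- ===== PRECONDITION & SPEC =====
def Spec_get_prompt_for_year (date_str : String) (out : String) : Prop := out = get_prompt_for_year_alt date_str
instance (date_str : String) (out : String) : Decidable (Spec_get_prompt_for_year date_str out) := by unfold Spec_get_prompt_for_year; infer_instance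

-- ===== CLAIM (what is proved, stated in full; the proofs are below) =====
def Claim_equal_get_prompt_for_year : Prop := ∀ (date_str : String), Dom_get_prompt_for_year date_str → Spec_get_prompt_for_year date_str (get_prompt_for_year date_str)

-- ===== LEMMAS AND PROOFS =====

lemma pv_sorted_keys :
    PySem.List.sorted PLANTILLAS_POR_ANO.keys (fun k => k) false =
    [2016, 2017, 2018, 2019, 2020, 2021, 2022, 2023, 2024, 2025] := by decide

lemma pv_best_eq (y : Int) :
    ([2016, 2017, 2018, 2019, 2020, 2021, 2022, 2023, 2024, 2025].foldl
        (fun best k => if k ≤ y then k else best)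
        ((PySem.List.pyGet? ([2016, 2017, 2018, 2019, 2020, 2021, 2022, 2023, 2024, 2025] : List Int) 0).getD 0)) =
      PySem.List.pyGetD ([2016, 2017, 2018, 2019, 2020, 2021, 2022, 2023, 2024, 2025] : List Int)
        ((pvBisectRight [2016, 2017, 2018, 2019, 2020, 2021, 2022, 2023, 2024, 2025] y 0 10 - 1 : Nat) : Int) 0 := by
  by_cases h0 : y < 2016
  · 
    have hb : pvBisectRight ([2016, 2017, 2018, 2019, 2020, 2021, 2022, 2023, 2024, 2025] : List Int) y 0 10 = 0 := by
      rw [pvBisectRight]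
      norm_num [PySem.List.pyGetD, PySem.List.pyIdx?, PySem.List.pyGet?]
      rw [if_neg (by first | omega | (simp; omega))]
      rw [pvBisectRight]
      norm_num [PySem.List.pyGetD, PySem.List.pyIdx?, PySem.List.pyGet?]
      rw [if_neg (by first | omega | (simp; omega))]
      rw [pvBisectRight]
      norm_num [PySem.List.pyGetD, PySem.List.pyIdx?, PySem.List.pyGet?]
      rw [if_neg (by first | omega | (simp; omega))]
      rw [pvBisectRight]
      norm_num [PySem.List.pyGetD, PySem.List.pyIdx?, PySem.List.pyGet?]
      rw [if_neg (by first | omega | (simp; omega))]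
      rw [pvBisectRight]
      norm_num
    rw [hb]
    norm_num [List.foldl, PySem.List.pyGetD, PySem.List.pyIdx?, PySem.List.pyGet?, show ¬((2016:Int) ≤ y) from by omega, show ¬((2017:Int) ≤ y) from by omega, show ¬((2018:Int) ≤ y) from by omega, show ¬((2019:Int) ≤ y) from by omega, show ¬((2020:Int) ≤ y) from by omega, show ¬((2021:Int) ≤ y) from by omega, show ¬((2022:Int) ≤ y) from by omega, show ¬((2023:Int) ≤ y) from by omega, show ¬((2024:Int) ≤ y) from by omega, show ¬((2025:Int) ≤ y) from by omega]
    try decide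
  by_cases h1 : y < 2017
  · 
    have hb : pvBisectRight ([2016, 2017, 2018, 2019, 2020, 2021, 2022, 2023, 2024, 2025] : List Int) y 0 10 = 1 := by
      rw [pvBisectRight]
      norm_num [PySem.List.pyGetD, PySem.List.pyIdx?, PySem.List.pyGet?]
      rw [if_neg (by first | omega | (simp; omega))]
      rw [pvBisectRight]
      norm_num [PySem.List.pyGetD, PySem.List.pyIdx?, PySem.List.pyGet?]
      rw [if_neg (by first | omega | (simp; omega))]
      rw [pvBisectRight]
      norm_num [PySem.List.pyGetD, PySem.List.pyIdx?, PySem.List.pyGet?]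
      rw [if_neg (by first | omega | (simp; omega))]
      rw [pvBisectRight]
      norm_num [PySem.List.pyGetD, PySem.List.pyIdx?, PySem.List.pyGet?]
      rw [if_pos (by first | omega | (simp; omega))]
      rw [pvBisectRight]
      norm_num
    rw [hb]
    norm_num [List.foldl, PySem.List.pyGetD, PySem.List.pyIdx?, PySem.List.pyGet?, show ((2016:Int) ≤ y) from by omega, show ¬((2017:Int) ≤ y) from by omega, show ¬((2018:Int) ≤ y) from by omega, show ¬((2019:Int) ≤ y) from by omega, show ¬((2020:Int) ≤ y) from by omega, show ¬((2021:Int) ≤ y) from by omega, show ¬((2022:Int) ≤ y) from by omega, show ¬((2023:Int) ≤ y) from by omega, show ¬((2024:Int) ≤ y) from by omega, show ¬((2025:Int) ≤ y) from by omega]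
    try decide
  by_cases h2 : y < 2018
  · 
    have hb : pvBisectRight ([2016, 2017, 2018, 2019, 2020, 2021, 2022, 2023, 2024, 2025] : List Int) y 0 10 = 2 := by
      rw [pvBisectRight]
      norm_num [PySem.List.pyGetD, PySem.List.pyIdx?, PySem.List.pyGet?]
      rw [if_neg (by first | omega | (simp; omega))]
      rw [pvBisectRight]
      norm_num [PySem.List.pyGetD, PySem.List.pyIdx?, PySem.List.pyGet?]
      rw [if_neg (by first | omega | (simp; omega))]
      rw [pvBisectRight]
      norm_num [PySem.List.pyGetD, PySem.List.pyIdx?, PySem.List.pyGet?]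
      rw [if_pos (by first | omega | (simp; omega))]
      rw [pvBisectRight]
      norm_num
    rw [hb]
    norm_num [List.foldl, PySem.List.pyGetD, PySem.List.pyIdx?, PySem.List.pyGet?, show ((2016:Int) ≤ y) from by omega, show ((2017:Int) ≤ y) from by omega, show ¬((2018:Int) ≤ y) from by omega, show ¬((2019:Int) ≤ y) from by omega, show ¬((2020:Int) ≤ y) from by omega, show ¬((2021:Int) ≤ y) from by omega, show ¬((2022:Int) ≤ y) from by omega, show ¬((2023:Int) ≤ y) from by omega, show ¬((2024:Int) ≤ y) from by omega, show ¬((2025:Int) ≤ y) from by omega]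
    try decide
  by_cases h3 : y < 2019
  · 
    have hb : pvBisectRight ([2016, 2017, 2018, 2019, 2020, 2021, 2022, 2023, 2024, 2025] : List Int) y 0 10 = 3 := by
      rw [pvBisectRight]
      norm_num [PySem.List.pyGetD, PySem.List.pyIdx?, PySem.List.pyGet?]
      rw [if_neg (by first | omega | (simp; omega))]
      rw [pvBisectRight]
      norm_num [PySem.List.pyGetD, PySem.List.pyIdx?, PySem.List.pyGet?]
      rw [if_pos (by first | omega | (simp; omega))]
      rw [pvBisectRight]
      norm_num [PySem.List.pyGetD, PySem.List.pyIdx?, PySem.List.pyGet?]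
      rw [if_neg (by first | omega | (simp; omega))]
      rw [pvBisectRight]
      norm_num [PySem.List.pyGetD, PySem.List.pyIdx?, PySem.List.pyGet?]
      rw [if_neg (by first | omega | (simp; omega))]
      rw [pvBisectRight]
      norm_num
    rw [hb]
    norm_num [List.foldl, PySem.List.pyGetD, PySem.List.pyIdx?, PySem.List.pyGet?, show ((2016:Int) ≤ y) from by omega, show ((2017:Int) ≤ y) from by omega, show ((2018:Int) ≤ y) from by omega, show ¬((2019:Int) ≤ y) from by omega, show ¬((2020:Int) ≤ y) from by omega, show ¬((2021:Int) ≤ y) from by omega, show ¬((2022:Int) ≤ y) from by omega, show ¬((2023:Int) ≤ y) from by omega, show ¬((2024:Int) ≤ y) from by omega, show ¬((2025:Int) ≤ y) from by omega]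
    try decide
  by_cases h4 : y < 2020
  · 
    have hb : pvBisectRight ([2016, 2017, 2018, 2019, 2020, 2021, 2022, 2023, 2024, 2025] : List Int) y 0 10 = 4 := by
      rw [pvBisectRight]
      norm_num [PySem.List.pyGetD, PySem.List.pyIdx?, PySem.List.pyGet?]
      rw [if_neg (by first | omega | (simp; omega))]
      rw [pvBisectRight]
      norm_num [PySem.List.pyGetD, PySem.List.pyIdx?, PySem.List.pyGet?]
      rw [if_pos (by first | omega | (simp; omega))]
      rw [pvBisectRight]
      norm_num [PySem.List.pyGetD, PySem.List.pyIdx?, PySem.List.pyGet?]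
      rw [if_neg (by first | omega | (simp; omega))]
      rw [pvBisectRight]
      norm_num [PySem.List.pyGetD, PySem.List.pyIdx?, PySem.List.pyGet?]
      rw [if_pos (by first | omega | (simp; omega))]
      rw [pvBisectRight]
      norm_num
    rw [hb]
    norm_num [List.foldl, PySem.List.pyGetD, PySem.List.pyIdx?, PySem.List.pyGet?, show ((2016:Int) ≤ y) from by omega, show ((2017:Int) ≤ y) from by omega, show ((2018:Int) ≤ y) from by omega, show ((2019:Int) ≤ y) from by omega, show ¬((2020:Int) ≤ y) from by omega, show ¬((2021:Int) ≤ y) from by omega, show ¬((2022:Int) ≤ y) from by omega, show ¬((2023:Int) ≤ y) from by omega, show ¬((2024:Int) ≤ y) from by omega, show ¬((2025:Int) ≤ y) from by omega]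
    try decide
  by_cases h5 : y < 2021
  · 
    have hb : pvBisectRight ([2016, 2017, 2018, 2019, 2020, 2021, 2022, 2023, 2024, 2025] : List Int) y 0 10 = 5 := by
      rw [pvBisectRight]
      norm_num [PySem.List.pyGetD, PySem.List.pyIdx?, PySem.List.pyGet?]
      rw [if_neg (by first | omega | (simp; omega))]
      rw [pvBisectRight]
      norm_num [PySem.List.pyGetD, PySem.List.pyIdx?, PySem.List.pyGet?]
      rw [if_pos (by first | omega | (simp; omega))]
      rw [pvBisectRight]
      norm_num [PySem.List.pyGetD, PySem.List.pyIdx?, PySem.List.pyGet?]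
      rw [if_pos (by first | omega | (simp; omega))]
      rw [pvBisectRight]
      norm_num
    rw [hb]
    norm_num [List.foldl, PySem.List.pyGetD, PySem.List.pyIdx?, PySem.List.pyGet?, show ((2016:Int) ≤ y) from by omega, show ((2017:Int) ≤ y) from by omega, show ((2018:Int) ≤ y) from by omega, show ((2019:Int) ≤ y) from by omega, show ((2020:Int) ≤ y) from by omega, show ¬((2021:Int) ≤ y) from by omega, show ¬((2022:Int) ≤ y) from by omega, show ¬((2023:Int) ≤ y) from by omega, show ¬((2024:Int) ≤ y) from by omega, show ¬((2025:Int) ≤ y) from by omega]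
    try decide
  by_cases h6 : y < 2022
  · 
    have hb : pvBisectRight ([2016, 2017, 2018, 2019, 2020, 2021, 2022, 2023, 2024, 2025] : List Int) y 0 10 = 6 := by
      rw [pvBisectRight]
      norm_num [PySem.List.pyGetD, PySem.List.pyIdx?, PySem.List.pyGet?]
      rw [if_pos (by first | omega | (simp; omega))]
      rw [pvBisectRight]
      norm_num [PySem.List.pyGetD, PySem.List.pyIdx?, PySem.List.pyGet?]
      rw [if_neg (by first | omega | (simp; omega))]
      rw [pvBisectRight]
      norm_num [PySem.List.pyGetD, PySem.List.pyIdx?, PySem.List.pyGet?]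
      rw [if_neg (by first | omega | (simp; omega))]
      rw [pvBisectRight]
      norm_num [PySem.List.pyGetD, PySem.List.pyIdx?, PySem.List.pyGet?]
      rw [if_neg (by first | omega | (simp; omega))]
      rw [pvBisectRight]
      norm_num
    rw [hb]
    norm_num [List.foldl, PySem.List.pyGetD, PySem.List.pyIdx?, PySem.List.pyGet?, show ((2016:Int) ≤ y) from by omega, show ((2017:Int) ≤ y) from by omega, show ((2018:Int) ≤ y) from by omega, show ((2019:Int) ≤ y) from by omega, show ((2020:Int) ≤ y) from by omega, show ((2021:Int) ≤ y) from by omega, show ¬((2022:Int) ≤ y) from by omega, show ¬((2023:Int) ≤ y) from by omega, show ¬((2024:Int) ≤ y) from by omega, show ¬((2025:Int) ≤ y) from by omega]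
    try decide
  by_cases h7 : y < 2023
  · 
    have hb : pvBisectRight ([2016, 2017, 2018, 2019, 2020, 2021, 2022, 2023, 2024, 2025] : List Int) y 0 10 = 7 := by
      rw [pvBisectRight]
      norm_num [PySem.List.pyGetD, PySem.List.pyIdx?, PySem.List.pyGet?]
      rw [if_pos (by first | omega | (simp; omega))]
      rw [pvBisectRight]
      norm_num [PySem.List.pyGetD, PySem.List.pyIdx?, PySem.List.pyGet?]
      rw [if_neg (by first | omega | (simp; omega))]
      rw [pvBisectRight]
      norm_num [PySem.List.pyGetD, PySem.List.pyIdx?, PySem.List.pyGet?]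
      rw [if_neg (by first | omega | (simp; omega))]
      rw [pvBisectRight]
      norm_num [PySem.List.pyGetD, PySem.List.pyIdx?, PySem.List.pyGet?]
      rw [if_pos (by first | omega | (simp; omega))]
      rw [pvBisectRight]
      norm_num
    rw [hb]
    norm_num [List.foldl, PySem.List.pyGetD, PySem.List.pyIdx?, PySem.List.pyGet?, show ((2016:Int) ≤ y) from by omega, show ((2017:Int) ≤ y) from by omega, show ((2018:Int) ≤ y) from by omega, show ((2019:Int) ≤ y) from by omega, show ((2020:Int) ≤ y) from by omega, show ((2021:Int) ≤ y) from by omega, show ((2022:Int) ≤ y) from by omega, show ¬((2023:Int) ≤ y) from by omega, show ¬((2024:Int) ≤ y) from by omega, show ¬((2025:Int) ≤ y) from by omega]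
    try decide
  by_cases h8 : y < 2024
  · 
    have hb : pvBisectRight ([2016, 2017, 2018, 2019, 2020, 2021, 2022, 2023, 2024, 2025] : List Int) y 0 10 = 8 := by
      rw [pvBisectRight]
      norm_num [PySem.List.pyGetD, PySem.List.pyIdx?, PySem.List.pyGet?]
      rw [if_pos (by first | omega | (simp; omega))]
      rw [pvBisectRight]
      norm_num [PySem.List.pyGetD, PySem.List.pyIdx?, PySem.List.pyGet?]
      rw [if_neg (by first | omega | (simp; omega))]
      rw [pvBisectRight]
      norm_num [PySem.List.pyGetD, PySem.List.pyIdx?, PySem.List.pyGet?]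
      rw [if_pos (by first | omega | (simp; omega))]
      rw [pvBisectRight]
      norm_num
    rw [hb]
    norm_num [List.foldl, PySem.List.pyGetD, PySem.List.pyIdx?, PySem.List.pyGet?, show ((2016:Int) ≤ y) from by omega, show ((2017:Int) ≤ y) from by omega, show ((2018:Int) ≤ y) from by omega, show ((2019:Int) ≤ y) from by omega, show ((2020:Int) ≤ y) from by omega, show ((2021:Int) ≤ y) from by omega, show ((2022:Int) ≤ y) from by omega, show ((2023:Int) ≤ y) from by omega, show ¬((2024:Int) ≤ y) from by omega, show ¬((2025:Int) ≤ y) from by omega]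
    try decide
  by_cases h9 : y < 2025
  · 
    have hb : pvBisectRight ([2016, 2017, 2018, 2019, 2020, 2021, 2022, 2023, 2024, 2025] : List Int) y 0 10 = 9 := by
      rw [pvBisectRight]
      norm_num [PySem.List.pyGetD, PySem.List.pyIdx?, PySem.List.pyGet?]
      rw [if_pos (by first | omega | (simp; omega))]
      rw [pvBisectRight]
      norm_num [PySem.List.pyGetD, PySem.List.pyIdx?, PySem.List.pyGet?]
      rw [if_pos (by first | omega | (simp; omega))]
      rw [pvBisectRight]
      norm_num [PySem.List.pyGetD, PySem.List.pyIdx?, PySem.List.pyGet?]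
      rw [if_neg (by first | omega | (simp; omega))]
      rw [pvBisectRight]
      norm_num
    rw [hb]
    norm_num [List.foldl, PySem.List.pyGetD, PySem.List.pyIdx?, PySem.List.pyGet?, show ((2016:Int) ≤ y) from by omega, show ((2017:Int) ≤ y) from by omega, show ((2018:Int) ≤ y) from by omega, show ((2019:Int) ≤ y) from by omega, show ((2020:Int) ≤ y) from by omega, show ((2021:Int) ≤ y) from by omega, show ((2022:Int) ≤ y) from by omega, show ((2023:Int) ≤ y) from by omega, show ((2024:Int) ≤ y) from by omega, show ¬((2025:Int) ≤ y) from by omega]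
    try decide
  · 
    have hb : pvBisectRight ([2016, 2017, 2018, 2019, 2020, 2021, 2022, 2023, 2024, 2025] : List Int) y 0 10 = 10 := by
      rw [pvBisectRight]
      norm_num [PySem.List.pyGetD, PySem.List.pyIdx?, PySem.List.pyGet?]
      rw [if_pos (by first | omega | (simp; omega))]
      rw [pvBisectRight]
      norm_num [PySem.List.pyGetD, PySem.List.pyIdx?, PySem.List.pyGet?]
      rw [if_pos (by first | omega | (simp; omega))]
      rw [pvBisectRight]
      norm_num [PySem.List.pyGetD, PySem.List.pyIdx?, PySem.List.pyGet?]
      rw [if_pos (by first | omega | (simp; omega))]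
      rw [pvBisectRight]
      norm_num
    rw [hb]
    norm_num [List.foldl, PySem.List.pyGetD, PySem.List.pyIdx?, PySem.List.pyGet?, show ((2016:Int) ≤ y) from by omega, show ((2017:Int) ≤ y) from by omega, show ((2018:Int) ≤ y) from by omega, show ((2019:Int) ≤ y) from by omega, show ((2020:Int) ≤ y) from by omega, show ((2021:Int) ≤ y) from by omega, show ((2022:Int) ≤ y) from by omega, show ((2023:Int) ≤ y) from by omega, show ((2024:Int) ≤ y) from by omega, show ((2025:Int) ≤ y) from by omega]
    try decide

-- ===== VERDICT (by name: the statement is the Claim_ definition above) =====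
theorem get_prompt_for_year_spec : Claim_equal_get_prompt_for_year := by
  intro ds _
  unfold Spec_get_prompt_for_year get_prompt_for_year get_prompt_for_year_alt
  simp only [pv_sorted_keys, List.length_cons, List.length_nil]
  rw [pv_best_eq (pvParseYear ds)]
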